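-- pv_equiv track=rewrite | github.com/hong-sh/coding_test_practice | this_is_coding_test/sort/sort_04.py | math_compare
-- ===== SOURCE A (Python) =====
-- import copy
--
-- def name_compare(students:list):
--     students.sort(key=lambda x: x[0])
--     return students
--
-- def math_compare(students:list):
--     students.sort(key=lambda x: x[3], reverse=True)
--     buf_s = 0
--     buf_e = 0
--     for i in range(1, len(students)):
--         if students[i][3] == students[buf_s][3]:
--             buf_e = i
--         elif students[i][3] != students[buf_s][3] and buf_s < buf_e:
--             students[buf_s:buf_e+1] = name_compare(copy.deepcopy(students[buf_s:buf_e+1]))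
--             buf_s = i
--         else:
--             buf_s = i
--
--     if buf_e == len(students) -1:
--             students[buf_s:buf_e+1] = name_compare(copy.deepcopy(students[buf_s:buf_e+1]))
--
--     return students
-- ===== SOURCE B (Python) =====
-- def math_compare(students: list):
--     # two stable in-place passes: name ascending, then math score descending
--     students.sort(key=lambda x: x[0])
--     students.sort(key=lambda x: x[3], reverse=True)
--     return students
-- ===== Notes on version B (the rewrite author's own statement) =====
-- stated objective: simpler
-- what changed: Replaces A's score-descending sort followed by an index/buffer loop that detects each equal-score run and re-sorts its slice by name with two successive stable in-place sorts (name ascending, then score descending), relying on sort stability.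
import Mathlib
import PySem

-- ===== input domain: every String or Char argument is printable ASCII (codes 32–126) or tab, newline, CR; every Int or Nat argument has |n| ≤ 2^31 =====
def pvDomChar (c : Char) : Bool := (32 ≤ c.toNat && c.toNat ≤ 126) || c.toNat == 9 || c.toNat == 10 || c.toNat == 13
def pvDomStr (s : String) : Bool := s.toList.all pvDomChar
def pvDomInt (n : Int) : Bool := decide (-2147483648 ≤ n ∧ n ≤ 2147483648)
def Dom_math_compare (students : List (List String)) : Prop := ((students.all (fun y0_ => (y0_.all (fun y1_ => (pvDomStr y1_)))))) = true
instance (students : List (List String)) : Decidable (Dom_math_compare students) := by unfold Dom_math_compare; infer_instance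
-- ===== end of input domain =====

-- B replaces A's score-desc sort + buffer loop that re-sorts each equal-score slice by name with
-- two successive stable sorts (name asc, then score desc); both A and B sort the caller's list in
-- place in Python (same mutation), and the theorems below are about the returned value.

-- ===== PORT A =====
-- key functions: Python's 'lambda x: x[3]' and 'lambda x: x[0]' (pyGetD is exact for rows of length ≥ 4, which Pre_ guarantees)
def fKey (r : List String) : String := PySem.List.pyGetD r 3 ""
def gKey (r : List String) : String := PySem.List.pyGetD r 0 ""

def name_compare (students : List (List String)) : List (List String) :=
  PySem.List.sorted students gKey false

-- Python slice assignment students[a:b] = r; exact for 0 ≤ a ≤ b ≤ len, which holds at both call sites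
def setSlice (s : List (List String)) (a b : Int) (r : List (List String)) : List (List String) :=
  PySem.List.slice s none (some a) ++ r ++ PySem.List.slice s (some b) none

-- the body of A's for-loop, state = (students, buf_s, buf_e), argument i
def stepA (acc : List (List String) × Int × Int) (i : Int) : List (List String) × Int × Int :=
  if fKey (PySem.List.pyGetD acc.1 i []) = fKey (PySem.List.pyGetD acc.1 acc.2.1 []) then
    (acc.1, acc.2.1, i)
  else if fKey (PySem.List.pyGetD acc.1 i []) ≠ fKey (PySem.List.pyGetD acc.1 acc.2.1 []) ∧ acc.2.1 < acc.2.2 then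
    (setSlice acc.1 acc.2.1 (acc.2.2 + 1)
       (name_compare (PySem.List.slice acc.1 (some acc.2.1) (some (acc.2.2 + 1)))), i, acc.2.2)
  else
    (acc.1, i, acc.2.2)

def math_compare (students : List (List String)) : List (List String) :=
  let s := PySem.List.sorted students fKey true
  let st := (PySem.List.pyRange 1 (s.length : Int) 1).foldl stepA (s, 0, 0)
  if st.2.2 = (st.1.length : Int) - 1 then
    setSlice st.1 st.2.1 (st.2.2 + 1)
      (name_compare (PySem.List.slice st.1 (some st.2.1) (some (st.2.2 + 1))))
  else st.1

-- ===== PORT B =====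
def math_compare_alt (students : List (List String)) : List (List String) :=
  PySem.List.sorted (PySem.List.sorted students gKey false) fKey true

-- ===== PRECONDITION & SPEC =====
-- Pre_ excludes exactly the inputs on which Python A raises IndexError: a row shorter than 4 entries (x[3]).
def Pre_math_compare (students : List (List String)) : Prop := ∀ r ∈ students, 4 ≤ r.length
instance (students : List (List String)) : Decidable (Pre_math_compare students) := by unfold Pre_math_compare; infer_instance
def pvWitness_math_compare : List (List String) :=
  [["b", "k", "u", "5"], ["a", "m", "v", "7"], ["a", "n", "w", "5"]]

def Spec_math_compare (students : List (List String)) (out : List (List String)) : Prop := out = math_compare_alt students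
instance (students : List (List String)) (out : List (List String)) : Decidable (Spec_math_compare students out) := by unfold Spec_math_compare; infer_instance

-- ===== CLAIM (what is proved, stated in full; the proofs are below) =====
def Claim_equal_math_compare : Prop := ∀ (students : List (List String)), Dom_math_compare students → Pre_math_compare students → Spec_math_compare students (math_compare students)

-- ===== LEMMAS AND PROOFS =====

-- proof-layer shorthand: the distinct score values of xs, in descending order
def vals (xs : List (List String)) : List String :=
  PySem.List.sorted (PySem.List.dedup (xs.map fKey)) (fun v => v) true
-- the group of rows of xs carrying score v (in xs order)
def grp (xs : List (List String)) (v : String) : List (List String) :=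
  xs.filter (fun x => fKey x == v)
-- insertion of a value into a strictly descending list of distinct values
def insVal (w : String) : List String → List String
  | [] => [w]
  | v :: vs => if v < w then w :: v :: vs else if v = w then v :: vs else v :: insVal w vs

-- - generic insertBy facts -
theorem insertBy_cons {α : Type} (bf : α → α → Bool) (x y : α) (ys : List α) :
    PySem.List.insertBy bf x (y :: ys) = if bf x y then x :: y :: ys else y :: PySem.List.insertBy bf x ys := rfl

theorem insertBy_all_true {α : Type} (bf : α → α → Bool) (x : α) (l : List α)
    (h : ∀ a ∈ l, bf x a = true) : PySem.List.insertBy bf x l = x :: l := by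
  cases l with
  | nil => rfl
  | cons y ys => simp [insertBy_cons, h y (by simp)]

theorem insertBy_append_not {α : Type} (bf : α → α → Bool) (x : α) (l t : List α)
    (h : ∀ a ∈ l, bf x a = false) :
    PySem.List.insertBy bf x (l ++ t) = l ++ PySem.List.insertBy bf x t := by
  induction l with
  | nil => rfl
  | cons y ys ih =>
    simp only [List.cons_append, insertBy_cons, h y (by simp)]
    simp [ih (fun a ha => h a (by simp [ha]))]

-- - insVal facts -
theorem mem_insVal (w : String) (vs : List String) (a : String) :
    a ∈ insVal w vs ↔ a = w ∨ a ∈ vs := by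
  induction vs with
  | nil => simp [insVal]
  | cons v vs ih =>
    simp only [insVal]
    split_ifs with h1 h2
    · simp only [List.mem_cons]
    · subst h2; simp only [List.mem_cons]; tauto
    · simp only [List.mem_cons, ih]; tauto

theorem pairwise_insVal (w : String) (vs : List String) (h : vs.Pairwise (fun a b => b < a)) :
    (insVal w vs).Pairwise (fun a b => b < a) := by
  induction vs with
  | nil => simp [insVal]
  | cons v vs ih =>
    obtain ⟨h1, h2⟩ := List.pairwise_cons.mp h
    simp only [insVal]
    split_ifs with hlt heq
    · exact List.pairwise_cons.mpr ⟨by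
        intro b hb
        rcases List.mem_cons.mp hb with rfl | hb
        · exact hlt
        · exact lt_trans (h1 b hb) hlt,
        List.pairwise_cons.mpr ⟨h1, h2⟩⟩
    · exact List.pairwise_cons.mpr ⟨h1, h2⟩
    · refine List.pairwise_cons.mpr ⟨?_, ih h2⟩
      intro b hb
      rcases (mem_insVal w vs b).mp hb with rfl | hb
      · exact lt_of_le_of_ne (not_lt.mp hlt) (Ne.symm heq)
      · exact h1 b hb

-- - the key stability fact: inserting x into a descending group decomposition appends x to its group -
theorem insertBy_flatten (x : List String) (vs : List String) (G : String → List (List String))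
    (hv : vs.Pairwise (fun a b => b < a))
    (hg : ∀ v ∈ vs, ∀ a ∈ G v, fKey a = v)
    (hfresh : fKey x ∉ vs → G (fKey x) = []) :
    PySem.List.insertBy (fun a b => decide (fKey b < fKey a)) x ((vs.map G).flatten)
      = ((insVal (fKey x) vs).map (fun v => G v ++ if v = fKey x then [x] else [])).flatten := by
  induction vs with
  | nil =>
    have h0 : G (fKey x) = [] := hfresh (by simp)
    simp [insVal, h0, PySem.List.insertBy]
  | cons v vs ih =>
    obtain ⟨h1, h2⟩ := List.pairwise_cons.mp hv
    have hgv : ∀ a ∈ G v, fKey a = v := hg v (by simp)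
    have hflat : ((v :: vs).map G).flatten = G v ++ (vs.map G).flatten := by simp
    rcases lt_trichotomy v (fKey x) with hlt | heq | hgt
    · have hall : ∀ a ∈ ((v :: vs).map G).flatten, (fun a b => decide (fKey b < fKey a)) x a = true := by
        intro a ha
        rw [hflat] at ha
        rcases List.mem_append.mp ha with ha | ha
        · simp [hgv a ha, hlt]
        · obtain ⟨l, hl, hal⟩ := List.mem_flatten.mp ha
          obtain ⟨u, hu, rfl⟩ := List.mem_map.mp hl
          have hfa := hg u (by simp [hu]) a hal
          have : fKey a < fKey x := by rw [hfa]; exact lt_trans (h1 u hu) hlt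
          simp [this]
      rw [insertBy_all_true _ _ _ hall]
      have hne : ∀ u ∈ v :: vs, u ≠ fKey x := by
        intro u hu
        rcases List.mem_cons.mp hu with rfl | hu
        · exact ne_of_lt hlt
        · exact ne_of_lt (lt_trans (h1 u hu) hlt)
      have hw : G (fKey x) = [] := hfresh (fun hmem => (hne _ hmem) rfl)
      have hmap : ∀ u ∈ vs, (fun v => G v ++ if v = fKey x then [x] else []) u = G u :=
        fun u hu => by simp [hne u (by simp [hu])]
      simp only [insVal, if_pos hlt, List.map_cons, List.flatten_cons, List.map_congr_left hmap]
      simp [hw, hne v (by simp)]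
    · rw [hflat, insertBy_append_not _ _ _ _ (fun a ha => by simp [hgv a ha, heq]),
        insertBy_all_true _ _ _ ?later]
      case later =>
        intro a ha
        obtain ⟨l, hl, hal⟩ := List.mem_flatten.mp ha
        obtain ⟨u, hu, rfl⟩ := List.mem_map.mp hl
        have hfa := hg u (by simp [hu]) a hal
        have : fKey a < fKey x := by rw [hfa, ← heq]; exact h1 u hu
        simp [this]
      have hne : ∀ u ∈ vs, u ≠ fKey x := fun u hu => ne_of_lt (heq ▸ h1 u hu)
      have hmap : ∀ u ∈ vs, (fun v => G v ++ if v = fKey x then [x] else []) u = G u :=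
        fun u hu => by simp [hne u hu]
      simp only [insVal, if_neg (by simp [heq] : ¬ v < fKey x), if_pos heq,
        List.map_cons, List.flatten_cons, List.map_congr_left hmap]
      simp [heq]
    · rw [hflat, insertBy_append_not _ _ _ _ (fun a ha => by simp [hgv a ha, not_lt.mpr (le_of_lt hgt)])]
      rw [ih h2 (fun u hu => hg u (by simp [hu]))
        (fun hnm => hfresh (by simp [hnm, Ne.symm (ne_of_gt hgt)]))]
      rw [insVal, if_neg (not_lt.mpr (le_of_lt (by exact hgt))), if_neg (ne_of_gt hgt)]
      simp [ne_of_gt hgt]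

theorem nodup_of_pairwise_gt (vs : List String) (h : vs.Pairwise (fun a b => b < a)) : vs.Nodup :=
  List.Pairwise.imp (fun {a b} (hba : b < a) => (Ne.symm (ne_of_lt hba) : a ≠ b)) h

theorem vals_pairwise (xs : List (List String)) : (vals xs).Pairwise (fun a b => b < a) := by
  have hle := PySem.List.sorted_pairwise_rev (PySem.List.dedup (xs.map fKey)) (fun v => v)
  have hnd : (vals xs).Nodup := by
    have := PySem.List.sorted_perm (PySem.List.dedup (xs.map fKey)) (fun v => v) true
    exact this.nodup_iff.mpr (PySem.List.nodup_dedup _)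
  exact (hle.and hnd).imp (fun h => lt_of_le_of_ne h.1 (Ne.symm h.2))

theorem mem_vals (xs : List (List String)) (a : String) : a ∈ vals xs ↔ a ∈ xs.map fKey := by
  unfold vals
  rw [PySem.List.mem_sorted, PySem.List.mem_dedup]

theorem vals_append (xs : List (List String)) (x : List String) :
    vals (xs ++ [x]) = insVal (fKey x) (vals xs) := by
  apply PySem.List.sorted_rev_eq_of_perm_of_pairwise_gt
  · refine (List.perm_ext_iff_of_nodup
      (nodup_of_pairwise_gt _ (pairwise_insVal _ _ (vals_pairwise xs)))
      (PySem.List.nodup_dedup _)).mpr ?_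
    intro a
    rw [mem_insVal, PySem.List.mem_dedup, mem_vals]
    simp [eq_comm, or_comm]
  · exact pairwise_insVal _ _ (vals_pairwise xs)

-- the filter decomposition of a stable descending sort
theorem sorted_desc_eq_flatten_groups (xs : List (List String)) :
    PySem.List.sorted xs fKey true = ((vals xs).map (grp xs)).flatten := by
  induction xs using List.reverseRecOn with
  | nil => rfl
  | append_singleton ys x ih =>
    rw [PySem.List.sorted_rev_eq_foldl_insertBy, List.foldl_append, List.foldl_cons, List.foldl_nil,
      ← PySem.List.sorted_rev_eq_foldl_insertBy, ih]
    rw [insertBy_flatten x (vals ys) (grp ys) (vals_pairwise ys) ?hg ?hfresh]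
    case hg =>
      intro v _ a ha
      simpa using (List.mem_filter.mp ha).2
    case hfresh =>
      intro hnm
      apply List.filter_eq_nil_iff.mpr
      intro a ha
      simp only [beq_iff_eq]
      intro hfa
      exact hnm ((mem_vals ys (fKey x)).mpr (List.mem_map.mpr ⟨a, ha, hfa⟩))
    rw [vals_append]
    congr 1
    apply List.map_congr_left
    intro v _
    simp only [grp, List.filter_append, List.filter_cons, List.filter_nil]
    by_cases hvx : v = fKey x
    · simp [hvx]
    · simp [hvx, show ¬ fKey x = v from fun h => hvx h.symm]

theorem vals_perm (xs ys : List (List String)) (h : ys.Perm xs) : vals ys = vals xs := by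
  apply PySem.List.sorted_rev_eq_of_perm_of_pairwise_gt
  · refine (List.perm_ext_iff_of_nodup
      (nodup_of_pairwise_gt _ (vals_pairwise xs))
      (PySem.List.nodup_dedup _)).mpr ?_
    intro a
    rw [mem_vals, PySem.List.mem_dedup, (h.map fKey).mem_iff]
  · exact vals_pairwise xs

-- - filter commutes with the stable name sort -
theorem filter_insertBy {α κ : Type} [LinearOrder κ] (key : α → κ) (p : α → Bool) (x : α)
    (l : List α) (hl : l.Pairwise (fun a b => key a ≤ key b)) :
    (PySem.List.insertBy (fun a b => decide (key a < key b)) x l).filter p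
      = if p x then PySem.List.insertBy (fun a b => decide (key a < key b)) x (l.filter p)
        else l.filter p := by
  induction l with
  | nil => cases hpx : p x <;> simp [PySem.List.insertBy, hpx]
  | cons y t ih =>
    obtain ⟨h1, h2⟩ := List.pairwise_cons.mp hl
    rw [insertBy_cons]
    by_cases hxy : key x < key y
    · rw [if_pos (by simpa using hxy)]
      cases hpx : p x
      · simp [List.filter_cons, hpx]
      · cases hpy : p y
        · have hins : PySem.List.insertBy (fun a b => decide (key a < key b)) x (t.filter p)
              = x :: t.filter p := by
            apply insertBy_all_true
            intro a ha
            have := h1 a (List.mem_of_mem_filter ha)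
            simp [lt_of_lt_of_le hxy this]
          simp [hpx, hpy, hins]
        · simp [hpx, hpy, insertBy_cons, hxy]
    · rw [if_neg (by simpa using hxy)]
      cases hpx : p x <;> cases hpy : p y <;>
        simp [hpx, hpy, ih h2, insertBy_cons, hxy]

theorem filter_sorted_g (p : List String → Bool) (xs : List (List String)) :
    (PySem.List.sorted xs gKey false).filter p = PySem.List.sorted (xs.filter p) gKey false := by
  induction xs using List.reverseRecOn with
  | nil => rfl
  | append_singleton ys x ih =>
    rw [PySem.List.sorted_eq_foldl_insertBy, List.foldl_append, List.foldl_cons, List.foldl_nil,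
      ← PySem.List.sorted_eq_foldl_insertBy,
      filter_insertBy gKey p x _ (PySem.List.sorted_pairwise ys gKey), ih, List.filter_append]
    cases hpx : p x
    · simp [hpx]
    · simp only [List.filter_cons, hpx, List.filter_nil, if_true]
      rw [PySem.List.sorted_eq_foldl_insertBy (ys.filter p ++ [x]), List.foldl_append,
        List.foldl_cons, List.foldl_nil, ← PySem.List.sorted_eq_foldl_insertBy]

-- - loop characterisation -
-- the tail of A: the for-loop from index c+1 plus the final conditional re-sort
def finishA (st : List (List String) × Int × Int) : List (List String) :=
  if st.2.2 = (st.1.length : Int) - 1 then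
    setSlice st.1 st.2.1 (st.2.2 + 1)
      (name_compare (PySem.List.slice st.1 (some st.2.1) (some (st.2.2 + 1))))
  else st.1

def runFrom (s : List (List String)) (c be : Int) : List (List String) :=
  finishA ((PySem.List.pyRange (c + 1) (s.length : Int) 1).foldl stepA (s, c, be))

theorem math_compare_eq_runFrom (students : List (List String)) :
    math_compare students = runFrom (PySem.List.sorted students fKey true) 0 0 := by
  unfold math_compare runFrom finishA
  norm_num

theorem stepA_tie (s : List (List String)) (bs be i : Int)
    (h : fKey (PySem.List.pyGetD s i []) = fKey (PySem.List.pyGetD s bs [])) :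
    stepA (s, bs, be) i = (s, bs, i) := by
  simp [stepA, h]

theorem stepA_sort (s : List (List String)) (bs be i : Int)
    (h : fKey (PySem.List.pyGetD s i []) ≠ fKey (PySem.List.pyGetD s bs [])) (hlt : bs < be) :
    stepA (s, bs, be) i =
      (setSlice s bs (be + 1) (name_compare (PySem.List.slice s (some bs) (some (be + 1)))), i, be) := by
  simp [stepA, h, hlt]

theorem stepA_plain (s : List (List String)) (bs be i : Int)
    (h : fKey (PySem.List.pyGetD s i []) ≠ fKey (PySem.List.pyGetD s bs [])) (hnlt : ¬ bs < be) :
    stepA (s, bs, be) i = (s, i, be) := by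
  simp [stepA, h, hnlt]

theorem getMid (C B R : List (List String)) (t : Nat) (ht : t < B.length) :
    PySem.List.pyGetD (C ++ (B ++ R)) ((C.length : Int) + (t : Int)) [] = B[t] := by
  have h : ((C.length : Int) + (t : Int)) = ((C.length + t : Nat) : Int) := by push_cast; ring
  rw [h, PySem.List.pyGetD_natCast, List.getD_eq_getElem?_getD,
    List.getElem?_append_right (by omega), show C.length + t - C.length = t from by omega]
  rw [List.getElem?_append_left ht]
  simp [List.getElem?_eq_getElem ht]

theorem slice_mid (C B R : List (List String)) :
    PySem.List.slice (C ++ (B ++ R)) (some (C.length : Int))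
      (some ((C.length : Int) + (B.length : Int))) = B := by
  rw [PySem.List.slice_natCast_add, List.drop_left, List.take_left]

theorem setSlice_mid (C B R r : List (List String)) :
    setSlice (C ++ (B ++ R)) ((C.length : Int)) ((C.length : Int) + (B.length : Int)) r
      = C ++ (r ++ R) := by
  unfold setSlice
  have h : (C.length : Int) + (B.length : Int) = ((C.length + B.length : Nat) : Int) := by
    push_cast; ring
  rw [h, PySem.List.slice_from_natCast]
  rw [show (C ++ (B ++ R)) = (C ++ B) ++ R from by simp,
    show C.length + B.length = (C ++ B).length from by simp, List.drop_left]
  rw [PySem.List.slice_to_natCast, show (C ++ B ++ R) = C ++ (B ++ R) from by simp,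
    List.take_left]
  simp

theorem foldl_last (l : List Int) (s : List (List String)) (bs : Int)
    (h : ∀ i ∈ l, ∀ be, stepA (s, bs, be) i = (s, bs, i)) :
    ∀ be, l.foldl stepA (s, bs, be) = (s, bs, l.foldl (fun _ i => i) be) := by
  induction l with
  | nil => intro be; rfl
  | cons i l ih =>
    intro be
    rw [List.foldl_cons, h i (by simp) be, List.foldl_cons]
    exact ih (fun j hj be' => h j (by simp [hj]) be') i

theorem pyRange_foldl_last (b : Int) :
    ∀ (n : Nat) (a be : Int), (b - a).toNat = n →
      (PySem.List.pyRange a b 1).foldl (fun _ i => i) be = if a < b then b - 1 else be := by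
  intro n
  induction n with
  | zero =>
    intro a be hn
    rw [PySem.List.pyRange_one_eq_nil (by omega)]
    simp [show ¬ a < b from by omega]
  | succ n ih =>
    intro a be hn
    have hab : a < b := by omega
    rw [PySem.List.pyRange_one_cons hab, List.foldl_cons, ih (a + 1) a (by omega)]
    by_cases h1 : a + 1 < b
    · simp [h1, hab]
    · have : a = b - 1 := by omega
      simp [this]

theorem name_compare_singleton (b : List String) : name_compare [b] = [b] := rfl

theorem loop_blocks (bl : List (List (List String))) :
    ∀ (vsl : List String) (C : List (List String)) (be : Int),
    List.Forall₂ (fun v B => B ≠ [] ∧ ∀ a ∈ B, fKey a = v) vsl bl →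
    vsl.Pairwise (fun a b => a ≠ b) →
    0 ≤ be →
    (be < (C.length : Int) ∨ (be = 0 ∧ C = [])) →
    runFrom (C ++ bl.flatten) (C.length : Int) be = C ++ (bl.map name_compare).flatten := by
  induction bl with
  | nil =>
    intro vsl C be hf hp hbe hinv
    cases hf
    unfold runFrom
    rw [List.flatten_nil, List.append_nil, PySem.List.pyRange_one_eq_nil (by omega)]
    simp only [List.foldl_nil, List.map_nil, List.flatten_nil]
    unfold finishA
    by_cases hc : be = (C.length : Int) - 1
    · rw [if_pos hc]
      have h1 : be + 1 = ((C.length : Nat) : Int) := by omega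
      have hs : PySem.List.slice C (some ((C.length : Nat) : Int)) (some ((C.length : Nat) : Int))
          = [] := by
        rw [PySem.List.slice_natCast]; simp
      rw [h1, hs, show name_compare [] = [] from rfl]
      unfold setSlice
      rw [PySem.List.slice_to_natCast, PySem.List.slice_from_natCast]
      simp
    · rw [if_neg hc]; simp
  | cons B rest ih =>
    intro vsl C be hf hp hbe hinv
    cases vsl with
    | nil => cases hf
    | cons v vsl' =>
    cases hf with
    | cons hPB hf' =>
    obtain ⟨hBne, hBc⟩ := hPB
    obtain ⟨h1, hp'⟩ := List.pairwise_cons.mp hp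
    have hB1 : 0 < B.length := List.length_pos_iff.mpr hBne
    unfold runFrom
    rw [List.flatten_cons]
    have hlen : ((C ++ (B ++ rest.flatten)).length : Int)
        = (C.length : Int) + (B.length : Int) + (rest.flatten.length : Int) := by
      simp [List.length_append]; ring
    have hs0 : fKey (PySem.List.pyGetD (C ++ (B ++ rest.flatten)) ((C.length : Int)) []) = v := by
      rw [show (C.length : Int) = (C.length : Int) + ((0 : Nat) : Int) from by simp,
        getMid C B _ 0 hB1]
      exact hBc _ (List.getElem_mem _)
    rw [PySem.List.pyRange_one_append ((C.length : Int) + 1) ((C.length : Int) + (B.length : Int))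
      _ (by omega) (by omega), List.foldl_append]
    have htie : ∀ i ∈ PySem.List.pyRange ((C.length : Int) + 1) ((C.length : Int) + (B.length : Int)),
        ∀ be', stepA (C ++ (B ++ rest.flatten), (C.length : Int), be') i
          = (C ++ (B ++ rest.flatten), (C.length : Int), i) := by
      intro i hi be'
      obtain ⟨hi1, hi2⟩ := PySem.List.mem_pyRange_one.mp hi
      have htB : (i - C.length).toNat < B.length := by omega
      have hit : i = (C.length : Int) + (((i - C.length).toNat : Nat) : Int) := by omega
      apply stepA_tie
      rw [hit, getMid C B _ _ htB, hs0]
      exact hBc _ (List.getElem_mem _)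
    rw [foldl_last _ _ _ htie be,
      pyRange_foldl_last _ (((C.length : Int) + (B.length : Int)) - ((C.length : Int) + 1)).toNat
        _ _ rfl]
    cases rest with
    | nil =>
      rw [PySem.List.pyRange_one_eq_nil
        (by simp only [List.flatten_nil, List.append_nil, List.length_append]; push_cast; omega),
        List.foldl_nil]
      unfold finishA
      simp only [List.flatten_nil, List.map_cons, List.map_nil]
      by_cases hB2 : 1 < B.length
      · have hcond : (C.length : Int) + 1 < (C.length : Int) + (B.length : Int) := by
          have : (1 : Int) < (B.length : Int) := by exact_mod_cast hB2
          omega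
        rw [if_pos hcond,
          if_pos (by simp only [List.append_nil, List.length_append]; push_cast; omega),
          show (C.length : Int) + (B.length : Int) - 1 + 1 = (C.length : Int) + (B.length : Int)
            from by ring,
          slice_mid C B _, setSlice_mid C B _]
        simp
      · have hcond : ¬ ((C.length : Int) + 1 < (C.length : Int) + (B.length : Int)) := by
          have : (B.length : Int) ≤ 1 := by exact_mod_cast Nat.not_lt.mp hB2
          omega
        have hBlen : B.length = 1 := by omega
        obtain ⟨b, rfl⟩ : ∃ b, B = [b] := by
          cases B with
          | nil => simp at hB1
          | cons b t => cases t with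
            | nil => exact ⟨b, rfl⟩
            | cons _ _ => simp at hBlen
        rw [if_neg hcond]
        rcases hinv with hlt | ⟨rfl, rfl⟩
        · rw [if_neg (by simp only [List.append_nil, List.length_append]; push_cast; omega)]
          simp [name_compare_singleton]
        · rw [if_pos (by simp)]
          rw [show (0 : Int) + 1 = ((([] : List (List String)).length : Nat) : Int)
              + (([b] : List (List String)).length : Int) from by simp,
            slice_mid [] [b] [], setSlice_mid [] [b] []]
          simp [name_compare_singleton]
    | cons B' rest' =>
      cases vsl' with
      | nil => cases hf'
      | cons v' vsl'' =>
      have hB'ne : B' ≠ [] := by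
        cases hf' with | cons hPB' _ => exact hPB'.1
      have hB'c : ∀ a ∈ B', fKey a = v' := by
        cases hf' with | cons hPB' _ => exact hPB'.2
      have hB'1 : 0 < B'.length := List.length_pos_iff.mpr hB'ne
      have hj : (C.length : Int) + (B.length : Int) < ((C ++ (B ++ (B' :: rest').flatten)).length : Int) := by
        have h5 : ((C ++ (B ++ (B' :: rest').flatten)).length : Int)
            = (C.length : Int) + (B.length : Int) + (B'.length : Int) + (rest'.flatten.length : Int) := by
          simp only [List.length_append, List.flatten_cons]
          push_cast
          ring
        have h6 : (0 : Int) < (B'.length : Int) := by exact_mod_cast hB'1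
        omega
      rw [PySem.List.pyRange_one_cons hj, List.foldl_cons]
      have hs2 : C ++ (B ++ (B' :: rest').flatten) = (C ++ B) ++ (B' ++ rest'.flatten) := by
        simp [List.flatten_cons]
      have hsj : fKey (PySem.List.pyGetD (C ++ (B ++ (B' :: rest').flatten))
          ((C.length : Int) + (B.length : Int)) []) = v' := by
        rw [hs2, show (C.length : Int) + (B.length : Int)
            = (((C ++ B).length : Nat) : Int) + ((0 : Nat) : Int) from by
              push_cast [List.length_append]; ring,
          getMid (C ++ B) B' _ 0 hB'1]
        exact hB'c _ (List.getElem_mem _)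
      have hne : fKey (PySem.List.pyGetD (C ++ (B ++ (B' :: rest').flatten))
            ((C.length : Int) + (B.length : Int)) [])
          ≠ fKey (PySem.List.pyGetD (C ++ (B ++ (B' :: rest').flatten)) ((C.length : Int)) []) := by
        rw [hsj, hs0]
        exact Ne.symm (h1 v' (by simp))
      by_cases hB2 : 1 < B.length
      · have hcond : (C.length : Int) + 1 < (C.length : Int) + (B.length : Int) := by
          have : (1 : Int) < (B.length : Int) := by exact_mod_cast hB2
          omega
        rw [if_pos hcond]
        rw [stepA_sort _ _ _ _ hne (by omega),
          show (C.length : Int) + (B.length : Int) - 1 + 1 = (C.length : Int) + (B.length : Int)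
            from by ring,
          slice_mid C B _, setSlice_mid C B _]
        have hC'len : (((C ++ name_compare B).length : Nat) : Int)
            = (C.length : Int) + (B.length : Int) := by
          simp [List.length_append, name_compare, PySem.List.length_sorted]
        have e2 : (C.length : Int) + (B.length : Int) = (((C ++ name_compare B).length : Nat) : Int) :=
          hC'len.symm
        have e1 : C ++ (name_compare B ++ (B' :: rest').flatten)
            = (C ++ name_compare B) ++ (B' :: rest').flatten := by simp
        have e3 : ((C ++ (B ++ (B' :: rest').flatten)).length : Int)
            = (((C ++ name_compare B) ++ (B' :: rest').flatten).length : Int) := by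
          simp [List.length_append, name_compare, PySem.List.length_sorted]
        rw [e1, e3, e2]
        have := ih (v' :: vsl'') (C ++ name_compare B)
          ((((C ++ name_compare B).length : Nat) : Int) - 1)
          hf' hp' (by rw [hC'len]; omega) (by left; omega)
        unfold runFrom at this
        rw [this]
        simp
      · have hcond : ¬ ((C.length : Int) + 1 < (C.length : Int) + (B.length : Int)) := by
          have : (B.length : Int) ≤ 1 := by exact_mod_cast Nat.not_lt.mp hB2
          omega
        rw [if_neg hcond]
        rw [stepA_plain _ _ _ _ hne (by rcases hinv with h | ⟨rfl, rfl⟩ <;> omega)]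
        have hC'len : (((C ++ B).length : Nat) : Int) = (C.length : Int) + (B.length : Int) := by
          simp [List.length_append]
        have e1 : C ++ (B ++ (B' :: rest').flatten) = (C ++ B) ++ (B' :: rest').flatten := by simp
        have e2 : (C.length : Int) + (B.length : Int) = (((C ++ B).length : Nat) : Int) := hC'len.symm
        rw [e1, e2]
        have := ih (v' :: vsl'') (C ++ B) be hf' hp'
          hbe (by left; rw [hC'len]; rcases hinv with h | ⟨rfl, rfl⟩ <;> omega)
        unfold runFrom at this
        rw [this]
        have hBsort : name_compare B = B := by
          obtain ⟨b, rfl⟩ : ∃ b, B = [b] := by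
            cases B with
            | nil => simp at hB1
            | cons b t => cases t with
              | nil => exact ⟨b, rfl⟩
              | cons _ _ => exact absurd (by simp [List.length_cons]) hB2
          exact name_compare_singleton b
        simp [hBsort]

-- ===== VERDICT (by name: the statement is the Claim_ definition above) =====
theorem grp_forall2 (students : List (List String)) :
    List.Forall₂ (fun v B => B ≠ [] ∧ ∀ a ∈ B, fKey a = v)
      (vals students) ((vals students).map (grp students)) := by
  have key : ∀ (l : List String),
      (∀ v ∈ l, grp students v ≠ [] ∧ ∀ a ∈ grp students v, fKey a = v) →
      List.Forall₂ (fun v B => B ≠ [] ∧ ∀ a ∈ B, fKey a = v) l (l.map (grp students)) := by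
    intro l
    induction l with
    | nil => intro _; exact List.Forall₂.nil
    | cons v t iht =>
      intro h
      exact List.Forall₂.cons (h v (by simp)) (iht (fun u hu => h u (by simp [hu])))
  apply key
  intro v hv
  refine ⟨?_, fun a ha => by simpa using (List.mem_filter.mp ha).2⟩
  obtain ⟨a, ha, hfa⟩ := List.mem_map.mp ((mem_vals students v).mp hv)
  intro hnil
  have : a ∈ grp students v := List.mem_filter.mpr ⟨ha, by simp [hfa]⟩
  simp [hnil] at this

theorem math_compare_spec : Claim_equal_math_compare := by
  intro students _ _
  unfold Spec_math_compare math_compare_alt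
  rw [math_compare_eq_runFrom, sorted_desc_eq_flatten_groups]
  have hA := loop_blocks ((vals students).map (grp students)) (vals students) [] 0
    (grp_forall2 students)
    ((vals_pairwise students).imp (fun {a b} (h : b < a) => (ne_of_lt h).symm))
    (le_refl 0) (Or.inr ⟨rfl, rfl⟩)
  simp only [List.nil_append, List.length_nil, Nat.cast_zero] at hA
  rw [hA]
  rw [sorted_desc_eq_flatten_groups (PySem.List.sorted students gKey false)]
  rw [vals_perm students (PySem.List.sorted students gKey false)
    (PySem.List.sorted_perm students gKey false)]
  rw [List.map_map]
  congr 1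
  apply List.map_congr_left
  intro v _
  show name_compare (grp students v) = grp (PySem.List.sorted students gKey false) v
  unfold grp name_compare
  rw [filter_sorted_g]
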